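-- pv_equiv track=rewrite | github.com/PickoCore/GVerter | converter/core/model_converter.py | _map_model_texture_path
-- ===== SOURCE A (Python) =====
-- def _map_model_texture_path(java_path: str) -> str:
--     """Map Java texture path dalam model ke Bedrock format"""
--     bedrock_path = java_path
--
--     # Konversi path components
--     path_mappings = {
--         "block/": "blocks/",
--         "item/": "items/",
--         "entity/": "entity/",
--         "misc/": "misc/",
--     }
--
--     for java_prefix, bedrock_prefix in path_mappings.items():
--         if java_path.startswith(java_prefix):
--             bedrock_path = bedrock_prefix + java_path[len(java_prefix):]
--             break
--
--     return bedrock_path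
-- ===== SOURCE B (Python) =====
-- def _map_model_texture_path(java_path: str) -> str:
--     """Map Java texture path dalam model ke Bedrock format"""
--     head, sep, rest = java_path.partition("/")
--     table = {"block": "blocks", "item": "items", "entity": "entity", "misc": "misc"}
--     if sep == "/" and head in table:
--         return table[head] + "/" + rest
--     return java_path
-- ===== Notes on version B (the rewrite author's own statement) =====
-- stated objective: idiomatic
-- what changed: Replaces the scan over the four prefix pairs (startswith plus slice) by a single partition at the first slash and one table lookup of the head segment.
import Mathlib
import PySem

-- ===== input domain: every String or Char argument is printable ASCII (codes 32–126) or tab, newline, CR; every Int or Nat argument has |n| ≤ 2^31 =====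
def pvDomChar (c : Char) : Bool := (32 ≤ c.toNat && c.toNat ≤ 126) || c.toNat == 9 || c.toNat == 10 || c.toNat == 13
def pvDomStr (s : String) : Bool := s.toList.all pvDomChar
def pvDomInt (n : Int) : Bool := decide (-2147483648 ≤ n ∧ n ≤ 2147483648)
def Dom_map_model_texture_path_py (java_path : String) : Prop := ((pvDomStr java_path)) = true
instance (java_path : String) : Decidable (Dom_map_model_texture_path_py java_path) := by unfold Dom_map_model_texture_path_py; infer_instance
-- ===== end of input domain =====

-- B replaces A's scan over the four prefix pairs (startswith + slice) by one partition at the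
-- first slash plus a single lookup of the head segment (idiomatic; same cost).

-- ===== PORT A =====
-- the dict literal path_mappings, in insertion order
def pvA_mappings : List (List Char × List Char) :=
  [("block/".toList, "blocks/".toList),
   ("item/".toList, "items/".toList),
   ("entity/".toList, "entity/".toList),
   ("misc/".toList, "misc/".toList)]

-- the for-loop with break: first matching prefix wins, else bedrock_path stays java_path
def pvA_loop (items : List (List Char × List Char)) (jp : List Char) : List Char :=
  match items with
  | [] => jp
  | (jpfx, bpfx) :: rest =>
    if PySem.Chars.startswith jp jpfx then
      bpfx ++ PySem.List.slice jp (some (jpfx.length : Int)) none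
    else pvA_loop rest jp

def map_model_texture_path_py (java_path : String) : String :=
  String.ofList (pvA_loop pvA_mappings java_path.toList)

-- ===== PORT B =====
def pvB_table : List (List Char × List Char) :=
  [("block".toList, "blocks".toList),
   ("item".toList, "items".toList),
   ("entity".toList, "entity".toList),
   ("misc".toList, "misc".toList)]

def map_model_texture_path_py_alt (java_path : String) : String :=
  let cs := java_path.toList
  let head := cs.takeWhile (· ≠ '/')          -- partition: part before the first '/'
  if head.length < cs.length then             -- sep = '/' (a '/' occurs in the string)
    match pvB_table.lookup head with
    | some b => String.ofList (b ++ '/' :: cs.drop (head.length + 1))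
    | none => java_path
  else java_path

-- ===== PRECONDITION & SPEC =====
def Spec_map_model_texture_path_py (java_path : String) (out : String) : Prop := out = map_model_texture_path_py_alt java_path
instance (java_path : String) (out : String) : Decidable (Spec_map_model_texture_path_py java_path out) := by unfold Spec_map_model_texture_path_py; infer_instance

-- ===== CLAIM (what is proved, stated in full; the proofs are below) =====
def Claim_equal_map_model_texture_path_py : Prop := ∀ (java_path : String), Dom_map_model_texture_path_py java_path → Spec_map_model_texture_path_py java_path (map_model_texture_path_py java_path)

-- ===== LEMMAS AND PROOFS =====

-- p ++ "/" is a prefix of cs  ↔  cs's part before the first '/' is exactly p and a '/' occurs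
lemma prefix_slash_iff (p cs : List Char) (hp : '/' ∉ p) :
    (p ++ ['/']) <+: cs ↔
      (cs.takeWhile (· ≠ '/') = p ∧ (cs.takeWhile (· ≠ '/')).length < cs.length) := by
  induction cs generalizing p with
  | nil => simp
  | cons c cs ih =>
    by_cases hc : c = '/'
    · subst hc
      cases p with
      | nil => simp
      | cons a p' =>
        simp only [List.mem_cons, not_or] at hp
        constructor
        · rintro ⟨t, ht⟩
          simp at ht
          exact (hp.1 ht.1.symm).elim
        · rintro ⟨h1, _⟩
          simp at h1
    · have hcd : (decide (c ≠ '/')) = true := by simp [hc]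
      cases p with
      | nil =>
        constructor
        · rintro ⟨t, ht⟩
          simp at ht
          exact (hc ht.1.symm).elim
        · rintro ⟨h1, _⟩
          simp [List.takeWhile_cons] at h1
          exact (hc h1).elim
      | cons a p' =>
        simp only [List.mem_cons, not_or] at hp
        have hih := ih p' hp.2
        simp only [List.cons_append, List.cons_prefix_cons, List.takeWhile_cons, hcd, if_true,
          List.cons.injEq, List.length_cons]
        constructor
        · rintro ⟨rfl, h⟩
          have := hih.mp h
          exact ⟨⟨rfl, this.1⟩, by omega⟩
        · rintro ⟨⟨rfl, h1⟩, h2⟩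
          exact ⟨rfl, hih.mpr ⟨h1, by omega⟩⟩

lemma startswith_eq_decide (cs p : List Char) :
    PySem.Chars.startswith cs p = decide (p <+: cs) := by
  simp only [PySem.Chars.startswith]
  by_cases h : p <+: cs
  · simp [List.isPrefixOf_iff_prefix, h]
  · simp [Bool.eq_false_iff, List.isPrefixOf_iff_prefix, h]

-- unfolds B's let-bindings (definitional)
lemma alt_eq (jp : String) : map_model_texture_path_py_alt jp =
    (if (jp.toList.takeWhile (· ≠ '/')).length < jp.toList.length then
      match pvB_table.lookup (jp.toList.takeWhile (· ≠ '/')) with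
      | some b => String.ofList (b ++ '/' :: jp.toList.drop ((jp.toList.takeWhile (· ≠ '/')).length + 1))
      | none => jp
    else jp) := rfl

-- ===== VERDICT (by name: the statement is the Claim_ definition above) =====
theorem map_model_texture_path_py_spec : Claim_equal_map_model_texture_path_py := by
  intro jp _
  unfold Spec_map_model_texture_path_py map_model_texture_path_py
  rw [alt_eq]
  have eb1 : "block/".toList = "block".toList ++ ['/'] := by decide
  have eb2 : "item/".toList = "item".toList ++ ['/'] := by decide
  have eb3 : "entity/".toList = "entity".toList ++ ['/'] := by decide
  have eb4 : "misc/".toList = "misc".toList ++ ['/'] := by decide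
  set cs := jp.toList with hcs
  simp only [pvA_loop, pvA_mappings, startswith_eq_decide, eb1, eb2, eb3, eb4]
  by_cases h1 : ("block".toList ++ ['/']) <+: cs
  · obtain ⟨htw, hlen⟩ := (prefix_slash_iff _ _ (by decide)).mp h1
    rw [if_pos (by simpa using h1), htw, if_pos (htw ▸ hlen),
      show pvB_table.lookup ("block".toList) = some ("blocks".toList) from by decide,
      PySem.List.slice_from (ha := by decide)]
    simp
  · rw [if_neg (by simpa using h1)]
    by_cases h2 : ("item".toList ++ ['/']) <+: cs
    · obtain ⟨htw, hlen⟩ := (prefix_slash_iff _ _ (by decide)).mp h2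
      rw [if_pos (by simpa using h2), htw, if_pos (htw ▸ hlen),
        show pvB_table.lookup ("item".toList) = some ("items".toList) from by decide,
        PySem.List.slice_from (ha := by decide)]
      simp
    · rw [if_neg (by simpa using h2)]
      by_cases h3 : ("entity".toList ++ ['/']) <+: cs
      · obtain ⟨htw, hlen⟩ := (prefix_slash_iff _ _ (by decide)).mp h3
        rw [if_pos (by simpa using h3), htw, if_pos (htw ▸ hlen),
          show pvB_table.lookup ("entity".toList) = some ("entity".toList) from by decide,
          PySem.List.slice_from (ha := by decide)]
        simp
      · rw [if_neg (by simpa using h3)]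
        by_cases h4 : ("misc".toList ++ ['/']) <+: cs
        · obtain ⟨htw, hlen⟩ := (prefix_slash_iff _ _ (by decide)).mp h4
          rw [if_pos (by simpa using h4), htw, if_pos (htw ▸ hlen),
            show pvB_table.lookup ("misc".toList) = some ("misc".toList) from by decide,
            PySem.List.slice_from (ha := by decide)]
          simp
        · rw [if_neg (by simpa using h4)]
          by_cases h5 : (cs.takeWhile (· ≠ '/')).length < cs.length
          · rw [if_pos h5]
            have n1 : cs.takeWhile (· ≠ '/') ≠ "block".toList := fun h =>
              h1 ((prefix_slash_iff _ _ (by decide)).mpr ⟨h, h5⟩)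
            have n2 : cs.takeWhile (· ≠ '/') ≠ "item".toList := fun h =>
              h2 ((prefix_slash_iff _ _ (by decide)).mpr ⟨h, h5⟩)
            have n3 : cs.takeWhile (· ≠ '/') ≠ "entity".toList := fun h =>
              h3 ((prefix_slash_iff _ _ (by decide)).mpr ⟨h, h5⟩)
            have n4 : cs.takeWhile (· ≠ '/') ≠ "misc".toList := fun h =>
              h4 ((prefix_slash_iff _ _ (by decide)).mpr ⟨h, h5⟩)
            have b1 := beq_eq_false_iff_ne.mpr n1
            have b2 := beq_eq_false_iff_ne.mpr n2
            have b3 := beq_eq_false_iff_ne.mpr n3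
            have b4 := beq_eq_false_iff_ne.mpr n4
            simp only [ne_eq, decide_not, hcs,
              show "block".toList = ['b','l','o','c','k'] from by decide,
              show "item".toList = ['i','t','e','m'] from by decide,
              show "entity".toList = ['e','n','t','i','t','y'] from by decide,
              show "misc".toList = ['m','i','s','c'] from by decide] at b1 b2 b3 b4
            simp [pvB_table, List.lookup, b1, b2, b3, b4, hcs]

          · rw [if_neg h5]
            simp [hcs]
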